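-- pv_equiv track=rewrite | github.com/BrettRey/erdos-problem-993 | scripts/family_miner_kernel_scaffold.py | poly_pow
-- ===== SOURCE A (Python) =====
-- from typing import Dict, List, Tuple, Optional, Iterable, Any
--
-- def poly_mul(a: List[int], b: List[int]) -> List[int]:
--     if a == [0] or b == [0]:
--         return [0]
--     out = [0]*(len(a)+len(b)-1)
--     for i, ai in enumerate(a):
--         if ai == 0:
--             continue
--         for j, bj in enumerate(b):
--             if bj:
--                 out[i+j] += ai*bj
--     while len(out) > 1 and out[-1] == 0:
--         out.pop()
--     return out
--
-- def poly_pow(a: List[int], k: int) -> List[int]: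
--     # exponentiation by squaring
--     if k == 0:
--         return [1]
--     if k == 1:
--         return a
--     res = [1]
--     base = a
--     e = k
--     while e > 0:
--         if e & 1:
--             res = poly_mul(res, base)
--         e >>= 1
--         if e:
--             base = poly_mul(base, base)
--     return res
-- ===== SOURCE B (Python) =====
-- def poly_mul(a, b):
--     if a == [0] or b == [0]:
--         return [0]
--     # gather form: compute each output coefficient directly as a bounded convolution sum
--     out = [sum(a[i] * b[j - i]
--                for i in range(max(0, j - len(b) + 1), min(j, len(a) - 1) + 1))
--            for j in range(len(a) + len(b) - 1)]
--     last = 0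
--     for j in range(len(out)):
--         if out[j] != 0:
--             last = j
--     return out[:last + 1]
--
-- def poly_pow(a, k):
--     # recursive divide-and-conquer squaring
--     if k <= 0:
--         return [1]
--     if k == 1:
--         return a
--     p = poly_pow(a, k // 2)
--     sq = poly_mul(p, p)
--     return poly_mul(sq, a) if k & 1 else sq
-- ===== Notes on version B (the rewrite author's own statement) =====
-- stated objective: alternative
-- what changed: poly_mul switches from scatter accumulation into a preallocated array with a pop-based trailing-zero trim to a gather form computing each coefficient as a bounded convolution sum with a last-nonzero-index slice, and poly_pow switches from the iterative bit-scanning square-and-multiply loop to recursive divide-and-conquer squaring (power k//2, square, extra multiply when k is odd).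
import Mathlib
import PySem

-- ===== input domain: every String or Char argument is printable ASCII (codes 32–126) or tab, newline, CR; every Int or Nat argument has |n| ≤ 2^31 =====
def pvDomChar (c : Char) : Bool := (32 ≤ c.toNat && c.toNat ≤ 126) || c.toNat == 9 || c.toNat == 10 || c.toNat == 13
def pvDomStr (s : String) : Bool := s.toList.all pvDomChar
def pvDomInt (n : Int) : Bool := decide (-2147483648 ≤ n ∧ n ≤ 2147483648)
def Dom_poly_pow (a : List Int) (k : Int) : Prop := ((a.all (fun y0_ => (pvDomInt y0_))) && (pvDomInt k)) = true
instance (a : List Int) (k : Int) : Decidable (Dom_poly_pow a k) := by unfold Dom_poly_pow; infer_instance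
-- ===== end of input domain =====

-- B replaces A's scatter-accumulate poly_mul + pop-trim by a gather convolution with a
-- last-nonzero-index slice, and A's iterative bit-scanning square-and-multiply loop by
-- recursive divide-and-conquer squaring; same results (objective: alternative).

-- ===== PORT A =====
-- inner `for j, bj in enumerate(b)` loop of poly_mul; Python's `out[i+j] += ai*bj` index
-- is always in range here (i < len a, j < len b, len out = len a + len b - 1), so
-- List.set/List.getD is exact where Python indexes.
def pmInner (ai : Int) (i : Nat) (b : List Int) (j : Nat) (out : List Int) : List Int :=
  match b with
  | [] => out
  | bj :: rest =>
      pmInner ai i rest (j + 1)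
        (if bj ≠ 0 then out.set (i + j) (out.getD (i + j) 0 + ai * bj) else out)

-- outer `for i, ai in enumerate(a)` loop of poly_mul (with the `if ai == 0: continue`)
def pmOuter (b : List Int) (a : List Int) (i : Nat) (out : List Int) : List Int :=
  match a with
  | [] => out
  | ai :: rest => pmOuter b rest (i + 1) (if ai = 0 then out else pmInner ai i b 0 out)

-- the trailing `while len(out) > 1 and out[-1] == 0: out.pop()` loop of A's poly_mul
def pyTrim (l : List Int) : List Int :=
  if 1 < l.length ∧ l.getLast? = some 0 then pyTrim l.dropLast else l
termination_by l.length
decreasing_by simp_all [List.length_dropLast]; omega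

def poly_mul (a b : List Int) : List Int :=
  if a = [0] ∨ b = [0] then [0]
  else pyTrim (pmOuter b a 0 (List.replicate (a.length + b.length - 1) 0))

-- the `while e > 0` loop of A's poly_pow (e >>= 1 is `>>> 1`, e & 1 is PySem.Int.band)
def powLoop (res base : List Int) (e : Int) : List Int :=
  if 0 < e then
    let res' := if PySem.Int.band e 1 ≠ 0 then poly_mul res base else res
    let e' := e >>> (1 : Nat)
    let base' := if e' ≠ 0 then poly_mul base base else base
    powLoop res' base' e'
  else res
termination_by e.toNat
decreasing_by
  have h2 : e >>> (1:Nat) = e / 2 := by simp [Int.shiftRight_eq_div_pow]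
  rename_i h; rw [h2]; omega

def poly_pow (a : List Int) (k : Int) : List Int :=
  if k = 0 then [1]
  else if k = 1 then a
  else powLoop [1] a k

-- ===== PORT B =====
-- Source B's inner generator `sum(a[i]*b[j-i] for i in range(max(0, j-len(b)+1), min(j, len(a)-1)+1))`;
-- every i the range produces satisfies 0 ≤ i < len a and 0 ≤ j - i < len b, so getD is exact
-- where Python indexes.
def convCoef (a b : List Int) (j : Int) : Int :=
  (PySem.List.pyRange (max 0 (j - b.length + 1)) (min j ((a.length : Int) - 1) + 1) 1).foldl
    (fun s i => s + a.getD i.toNat 0 * b.getD (j - i).toNat 0) 0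

-- Source B's `last = 0; for j in range(len(out)): if out[j] != 0: last = j`
def lastNZ : List Int → Nat → Nat → Nat
  | [], _, last => last
  | c :: t, j, last => lastNZ t (j + 1) (if c ≠ 0 then j else last)

-- Source B's poly_mul: gather comprehension over range(len(a)+len(b)-1), then `out[:last+1]`
-- (a slice with a nonnegative bound, i.e. List.take)
def poly_mulB (a b : List Int) : List Int :=
  if a = [0] ∨ b = [0] then [0]
  else
    let out := (PySem.List.pyRange 0 ((a.length : Int) + b.length - 1) 1).map (convCoef a b)
    out.take (lastNZ out 0 0 + 1)

def poly_pow_alt (a : List Int) (k : Int) : List Int :=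
  if k ≤ 0 then [1]
  else if k = 1 then a
  else
    let p := poly_pow_alt a (PySem.Int.floordiv k 2)
    let sq := poly_mulB p p
    if PySem.Int.band k 1 ≠ 0 then poly_mulB sq a else sq
termination_by k.toNat
decreasing_by
  rename_i h1 h2
  rw [PySem.Int.floordiv_eq_ediv_of_pos (by omega)]; omega

-- ===== PRECONDITION & SPEC =====
def Spec_poly_pow (a : List Int) (k : Int) (out : List Int) : Prop := out = poly_pow_alt a k
instance (a : List Int) (k : Int) (out : List Int) : Decidable (Spec_poly_pow a k out) := by unfold Spec_poly_pow; infer_instance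

-- ===== CLAIM (what is proved, stated in full; the proofs are below) =====
def Claim_equal_poly_pow : Prop := ∀ (a : List Int) (k : Int), Dom_poly_pow a k → Spec_poly_pow a k (poly_pow a k)

-- ===== LEMMAS AND PROOFS =====

-- abstraction: the polynomial over ℤ that a coefficient list denotes
noncomputable def toP (l : List Int) : Polynomial Int :=
  l.foldr (fun c p => Polynomial.C c + Polynomial.X * p) 0

theorem coeff_toP (l : List Int) (n : Nat) : (toP l).coeff n = l.getD n 0 := by
  induction l generalizing n with
  | nil => simp [toP]
  | cons x t ih =>
    cases n with
    | zero => simp [toP]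
    | succ m =>
      show (Polynomial.C x + Polynomial.X * toP t).coeff (m+1) = _
      rw [Polynomial.coeff_add, Polynomial.coeff_C, Polynomial.coeff_X_mul, ih m]
      simp [List.getD]

-- "no trailing zero unless the list is a single coefficient"
def Trimmed (l : List Int) : Prop := l.length ≤ 1 ∨ l.getLast? ≠ some 0

theorem toP_cons (x : Int) (t : List Int) :
    toP (x :: t) = Polynomial.C x + Polynomial.X * toP t := rfl

theorem toP_set_add (l : List Int) (n : Nat) (v : Int) (h : n < l.length) :
    toP (l.set n (l.getD n 0 + v)) = toP l + Polynomial.C v * Polynomial.X ^ n := by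
  induction l generalizing n with
  | nil => simp at h
  | cons x t ih =>
    cases n with
    | zero => simp [toP_cons, List.getD]; ring
    | succ m =>
      simp only [List.set_cons_succ, toP_cons, List.getD_cons_succ,
        ih m (by simpa using h), pow_succ]
      ring

theorem toP_replicate_zero (n : Nat) : toP (List.replicate n 0) = 0 := by
  induction n with
  | zero => rfl
  | succ m ih => simp [List.replicate_succ, toP_cons, ih]

theorem length_pmInner (ai : Int) (i : Nat) (b : List Int) :
    ∀ (j : Nat) (out : List Int), (pmInner ai i b j out).length = out.length := by
  induction b with
  | nil => intro j out; rfl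
  | cons bj rest ih =>
    intro j out
    simp only [pmInner, ih]
    split <;> simp

theorem toP_pmInner (ai : Int) (i : Nat) (b : List Int) :
    ∀ (j : Nat) (out : List Int), i + j + b.length ≤ out.length →
    toP (pmInner ai i b j out)
      = toP out + Polynomial.C ai * Polynomial.X ^ (i + j) * toP b := by
  induction b with
  | nil => intro j out _; simp [pmInner, toP]
  | cons bj rest ih =>
    intro j out h
    simp only [pmInner]
    have hlt : i + j < out.length := by simp at h; omega
    have hij : i + (j + 1) = (i + j) + 1 := by omega
    by_cases hbj : bj ≠ 0
    · rw [if_pos hbj, ih (j+1) _ (by rw [List.length_set]; simp at h ⊢; omega),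
        toP_set_add out (i+j) (ai*bj) hlt, toP_cons, hij, pow_succ, Polynomial.C_mul]
      ring
    · rw [if_neg hbj]
      push_neg at hbj
      rw [ih (j+1) out (by simp at h ⊢; omega), toP_cons, hbj, hij, pow_succ]
      simp only [Polynomial.C_0, zero_add]
      ring

theorem length_pmOuter (b : List Int) (a : List Int) :
    ∀ (i : Nat) (out : List Int), (pmOuter b a i out).length = out.length := by
  induction a with
  | nil => intro i out; rfl
  | cons ai rest ih =>
    intro i out
    simp only [pmOuter, ih]
    split <;> simp [length_pmInner]

theorem toP_pmOuter (b : List Int) (a : List Int) :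
    ∀ (i : Nat) (out : List Int), i + a.length + b.length ≤ out.length + 1 →
    toP (pmOuter b a i out)
      = toP out + Polynomial.X ^ i * toP a * toP b := by
  induction a with
  | nil => intro i out _; simp [pmOuter, toP]
  | cons ai rest ih =>
    intro i out h
    simp only [pmOuter]
    by_cases hai : ai = 0
    · rw [if_pos hai, ih (i+1) out (by simp at h ⊢; omega), toP_cons, hai, pow_succ]
      simp only [Polynomial.C_0, zero_add]
      ring
    · rw [if_neg hai, ih (i+1) _ (by rw [length_pmInner]; simp at h ⊢; omega),
        toP_pmInner ai i b 0 out (by simp at h ⊢; omega), toP_cons, pow_succ]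
      ring

theorem toP_pyTrim (l : List Int) : toP (pyTrim l) = toP l := by
  fun_induction pyTrim with
  | case1 l h ih =>
    rw [ih]
    obtain ⟨h1, h2⟩ := h
    apply Polynomial.ext
    intro n
    rw [coeff_toP, coeff_toP]
    rcases Nat.lt_trichotomy n (l.length - 1) with hn | hn | hn
    · simp [List.getD, List.getElem?_dropLast, hn,
        List.getElem?_eq_getElem (show n < l.length by omega)]
    · have hlast : l[l.length - 1]? = some 0 := by
        rw [← List.getLast?_eq_getElem?]; exact h2
      subst hn
      simp [List.getD, List.getElem?_dropLast, hlast]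
    · have hge : l.dropLast.length ≤ n := by simp [List.length_dropLast]; omega
      simp [List.getD, List.getElem?_eq_none hge,
        List.getElem?_eq_none (show l.length ≤ n by omega)]
  | case2 => rfl

theorem trimmed_pyTrim (l : List Int) : Trimmed (pyTrim l) := by
  fun_induction pyTrim with
  | case1 l h ih => exact ih
  | case2 l h =>
    unfold Trimmed
    by_cases h1 : 1 < l.length
    · exact Or.inr (fun hc => h ⟨h1, hc⟩)
    · exact Or.inl (by omega)

theorem pyTrim_ne_nil (l : List Int) (h : l ≠ []) : pyTrim l ≠ [] := by
  fun_induction pyTrim with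
  | case1 l hc ih =>
    apply ih
    intro hd
    have h1 := hc.1
    have h2 : l.dropLast.length = 0 := by rw [hd]; rfl
    rw [List.length_dropLast] at h2
    omega
  | case2 l hc => exact h

theorem toP_poly_mul (a b : List Int) : toP (poly_mul a b) = toP a * toP b := by
  unfold poly_mul
  split
  · rename_i h
    have h0 : toP [0] = 0 := by simp [toP]
    rcases h with h | h <;> rw [h0, h] <;> simp [h0]
  · rw [toP_pyTrim,
      toP_pmOuter b a 0 (List.replicate (a.length + b.length - 1) 0) (by simp; omega),
      toP_replicate_zero]
    simp [mul_comm]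

theorem trimmed_poly_mul (a b : List Int) : Trimmed (poly_mul a b) := by
  unfold poly_mul
  split
  · exact Or.inl (by simp)
  · exact trimmed_pyTrim _

theorem poly_mul_ne_nil (a b : List Int) (ha : a ≠ []) (hb : b ≠ []) :
    poly_mul a b ≠ [] := by
  unfold poly_mul
  split
  · simp
  · apply pyTrim_ne_nil
    rw [← List.length_pos_iff, length_pmOuter]
    rw [← List.length_pos_iff] at ha hb
    simp
    omega

-- nonempty trimmed coefficient list is determined by its polynomial
theorem trimmed_inj (l1 l2 : List Int) (h1 : l1 ≠ []) (h2 : l2 ≠ [])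
    (t1 : Trimmed l1) (t2 : Trimmed l2) (hp : toP l1 = toP l2) : l1 = l2 := by
  have hD : ∀ n, l1.getD n 0 = l2.getD n 0 := by
    intro n; rw [← coeff_toP, ← coeff_toP, hp]
  have key : ∀ x y : List Int, x ≠ [] → y ≠ [] → Trimmed y →
      (∀ n, x.getD n 0 = y.getD n 0) → ¬ x.length < y.length := by
    intro x y hx hy ty hD hlt
    have hy2 : 2 ≤ y.length := by
      rw [← List.length_pos_iff] at hx; omega
    have hlast : y.getLast? ≠ some 0 := by
      rcases ty with h | h
      · omega
      · exact h
    have heq := hD (y.length - 1)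
    have hyv : y.getD (y.length - 1) 0 ≠ 0 := by
      intro h0
      apply hlast
      rw [List.getLast?_eq_getElem?]
      have hg : y[y.length-1]? = some (y.getD (y.length - 1) 0) := by
        simp [List.getD, List.getElem?_eq_getElem (show y.length - 1 < y.length by omega)]
      rw [hg, h0]
    have hxv : x.getD (y.length - 1) 0 = 0 := by
      simp [List.getD]
      rw [List.getElem?_eq_none (by omega)]
      rfl
    rw [hxv] at heq
    exact hyv heq.symm
  have hlen : l1.length = l2.length := by
    rcases Nat.lt_trichotomy l1.length l2.length with h | h | h
    · exact absurd h (key l1 l2 h1 h2 t2 hD)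
    · exact h
    · exact absurd h (key l2 l1 h2 h1 t1 (fun n => (hD n).symm))
  apply List.ext_getElem hlen
  intro n hn1 hn2
  have heq := hD n
  simpa [List.getD, List.getElem?_eq_getElem hn1, List.getElem?_eq_getElem hn2] using heq

theorem toP_one : toP [1] = 1 := by simp [toP]

theorem band_one_pos (e : Int) (he : 0 < e) :
    (PySem.Int.band e 1 ≠ 0) ↔ e % 2 = 1 := by
  rw [PySem.Int.band_one, PySem.Int.mod_eq_emod_of_pos (by omega)]
  omega

theorem shiftRight_one (e : Int) : e >>> (1:Nat) = e / 2 := by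
  simp [Int.shiftRight_eq_div_pow]

-- ===== B-side multiplication: poly_mulB a b = poly_mul a b =====

-- the product's coefficients as a full-range convolution sum
theorem coeff_mul_getD (a b : List Int) (n : Nat) :
    (toP a * toP b).coeff n = ∑ i ∈ Finset.range (n+1), a.getD i 0 * b.getD (n-i) 0 := by
  rw [Polynomial.coeff_mul, Finset.Nat.sum_antidiagonal_eq_sum_range_succ_mk]
  simp [coeff_toP]

theorem convCoef_eq_coeff (a b : List Int) (n : Nat) :
    convCoef a b (n : Int) = (toP a * toP b).coeff n := by
  unfold convCoef
  rw [coeff_mul_getD, PySem.List.foldl_add, PySem.List.pyRange_one, List.map_map, zero_add]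
  set lo : Int := max 0 ((n : Int) - b.length + 1) with hlo
  set u : Int := min (n : Int) ((a.length : Int) - 1) + 1 with hu
  set c : Nat := (u - lo).toNat with hcnt
  have hlo0 : 0 ≤ lo := by omega
  have h1 : (List.map ((fun i => a.getD i.toNat 0 * b.getD ((n:Int) - i).toNat 0) ∘ fun k => lo + ↑k)
      (List.range c)).sum = ∑ k ∈ Finset.range c, a.getD (lo.toNat + k) 0 * b.getD (n - (lo.toNat + k)) 0 := by
    rw [show (∑ k ∈ Finset.range c, a.getD (lo.toNat + k) 0 * b.getD (n - (lo.toNat + k)) 0)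
        = ((List.range c).map (fun k => a.getD (lo.toNat + k) 0 * b.getD (n - (lo.toNat + k)) 0)).sum from rfl]
    congr 1
    apply List.map_congr_left
    intro k hk
    rw [List.mem_range] at hk
    have hk2 : lo + k < u := by omega
    have e1 : (lo + (k:Int)).toNat = lo.toNat + k := by omega
    have e2 : ((n:Int) - (lo + k)).toNat = n - (lo.toNat + k) := by omega
    simp only [Function.comp, e1, e2]
  rw [h1, show (∑ k ∈ Finset.range c, a.getD (lo.toNat + k) 0 * b.getD (n - (lo.toNat + k)) 0)
      = ∑ i ∈ Finset.Ico lo.toNat (lo.toNat + c), a.getD i 0 * b.getD (n - i) 0 from by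
        rw [Finset.sum_Ico_eq_sum_range]; simp]
  apply Finset.sum_subset
  · intro i hi
    rw [Finset.mem_Ico] at hi
    rw [Finset.mem_range]
    omega
  · intro i hi hni
    rw [Finset.mem_range] at hi
    rw [Finset.mem_Ico] at hni
    have : b.length ≤ n - i ∨ a.length ≤ i := by omega
    rcases this with h | h
    · rw [List.getD_eq_default _ _ h, mul_zero]
    · rw [List.getD_eq_default _ _ h, zero_mul]

-- B's raw gather array is A's raw scatter array
theorem rawB_eq_rawA (a b : List Int) :
    (PySem.List.pyRange 0 ((a.length : Int) + b.length - 1) 1).map (convCoef a b)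
      = pmOuter b a 0 (List.replicate (a.length + b.length - 1) 0) := by
  have hlenA : (pmOuter b a 0 (List.replicate (a.length + b.length - 1) 0)).length
      = a.length + b.length - 1 := by rw [length_pmOuter]; simp
  have htoP : toP (pmOuter b a 0 (List.replicate (a.length + b.length - 1) 0))
      = toP a * toP b := by
    rw [toP_pmOuter b a 0 _ (by simp; omega), toP_replicate_zero]
    simp [mul_comm]
  apply List.ext_getElem
  · rw [List.length_map, PySem.List.length_pyRange_one, hlenA]; omega
  · intro i h1 h2
    rw [List.getElem_map, PySem.List.getElem_pyRange_one, zero_add, convCoef_eq_coeff,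
      ← htoP, coeff_toP, List.getD_eq_getElem _ _ (by omega)]

-- B's last-nonzero slice is A's pop-trim
theorem lastNZ_append (t : List Int) (x : Int) :
    ∀ (j last : Nat), lastNZ (t ++ [x]) j last
      = if x ≠ 0 then j + t.length else lastNZ t j last := by
  induction t with
  | nil => intro j last; simp [lastNZ]
  | cons c r ih =>
    intro j last
    simp only [List.cons_append, lastNZ, ih]
    split
    · simp only [List.length_cons]; omega
    · rfl

theorem lastNZ_bound (t : List Int) :
    ∀ (j last : Nat), lastNZ t j last < j + t.length ∨ lastNZ t j last = last := by
  induction t with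
  | nil => intro j last; right; rfl
  | cons c r ih =>
    intro j last
    rcases ih (j+1) (if c ≠ 0 then j else last) with h | h
    · left; simp only [lastNZ, List.length_cons]; omega
    · simp only [lastNZ, h]
      split
      · left; simp only [List.length_cons]; omega
      · right; rfl

theorem take_lastNZ_eq_pyTrim (l : List Int) :
    l.take (lastNZ l 0 0 + 1) = pyTrim l := by
  induction l using List.reverseRecOn with
  | nil => rw [pyTrim]; simp
  | append_singleton t x ih =>
    rw [lastNZ_append]
    by_cases hx : x ≠ 0
    · rw [if_pos hx, pyTrim]
      have : ¬ (1 < (t ++ [x]).length ∧ (t ++ [x]).getLast? = some 0) := by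
        simp [List.getLast?_append]; intro _ h; exact absurd h hx
      rw [if_neg this]
      simp
    · rw [if_neg hx]
      push_neg at hx
      subst hx
      by_cases ht : t = []
      · subst ht
        rw [pyTrim]
        simp [lastNZ]
      · have hlen : 1 ≤ t.length := by
          rcases t with _ | _ <;> simp_all
        have hle : lastNZ t 0 0 + 1 ≤ t.length := by
          rcases lastNZ_bound t 0 0 with h | h <;> omega
        rw [List.take_append_of_le_length hle, ih]
        conv_rhs => rw [pyTrim]
        rw [if_pos ⟨by simp; omega, by simp [List.getLast?_append]⟩]
        simp

theorem poly_mulB_eq (a b : List Int) : poly_mulB a b = poly_mul a b := by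
  unfold poly_mulB poly_mul
  split
  · rfl
  · rw [rawB_eq_rawA, take_lastNZ_eq_pyTrim]

-- ===== pow-level equivalence =====

-- A's loop: for e ≥ 1 and nonempty res/base, the result is a nonempty trimmed
-- representation of toP res * toP base ^ e
theorem powLoop_spec : ∀ (n : Nat) (e : Int) (res base : List Int), e.toNat = n →
    1 ≤ e → res ≠ [] → base ≠ [] →
    powLoop res base e ≠ [] ∧ Trimmed (powLoop res base e) ∧
      toP (powLoop res base e) = toP res * toP base ^ e.toNat := by
  intro n
  induction n using Nat.strong_induction_on with
  | _ n ih =>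
  intro e res base hn he hr hb
  subst hn
  rw [powLoop, if_pos (by omega)]
  simp only [shiftRight_one]
  by_cases h1 : e = 1
  · subst h1
    rw [powLoop]
    norm_num
    refine ⟨poly_mul_ne_nil res base hr hb, trimmed_poly_mul res base, ?_⟩
    rw [toP_poly_mul]
  · have he2 : 2 ≤ e := by omega
    have hne : e / 2 ≠ 0 := by omega
    simp only [if_pos hne]
    set res' := if PySem.Int.band e 1 ≠ 0 then poly_mul res base else res with hres'
    have hr' : res' ≠ [] := by
      rw [hres']; split
      · exact poly_mul_ne_nil res base hr hb
      · exact hr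
    have hb' : poly_mul base base ≠ [] := poly_mul_ne_nil base base hb hb
    obtain ⟨hn', ht, hv⟩ := ih (e/2).toNat (by omega) (e/2) res' (poly_mul base base)
      rfl (by omega) hr' hb'
    clear ih
    refine ⟨hn', ht, ?_⟩
    rw [hv, toP_poly_mul]
    have hres'v : toP res' = toP res * toP base ^ (e % 2).toNat := by
      rw [hres']
      by_cases hodd : PySem.Int.band e 1 ≠ 0
      · rw [if_pos hodd, toP_poly_mul, (band_one_pos e (by omega)).1 hodd]
        norm_num
      · rw [if_neg hodd]
        have h0 : e % 2 = 0 := by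
          have := band_one_pos e (by omega); omega
        rw [h0]
        norm_num
    rw [hres'v, mul_pow,
      show e.toNat = (e % 2).toNat + ((e/2).toNat + (e/2).toNat) from by omega,
      pow_add, pow_add]
    ring

-- B's recursion: for k ≥ 2 and nonempty a, the result is a nonempty trimmed
-- representation of toP a ^ k
theorem alt_spec : ∀ (n : Nat) (k : Int) (a : List Int), k.toNat = n →
    2 ≤ k → a ≠ [] →
    poly_pow_alt a k ≠ [] ∧ Trimmed (poly_pow_alt a k) ∧
      toP (poly_pow_alt a k) = toP a ^ k.toNat := by
  intro n
  induction n using Nat.strong_induction_on with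
  | _ n ih =>
  intro k a hn hk ha
  subst hn
  rw [poly_pow_alt, if_neg (by omega), if_neg (by omega)]
  simp only [poly_mulB_eq]
  rw [PySem.Int.floordiv_eq_ediv_of_pos (by omega : (0:Int) < 2)]
  set p := poly_pow_alt a (k / 2) with hp
  have hph : p ≠ [] ∧ toP p = toP a ^ (k/2).toNat := by
    by_cases h1 : k / 2 = 1
    · have e1 : poly_pow_alt a 1 = a := by rw [poly_pow_alt]; norm_num
      rw [hp, h1, e1]
      exact ⟨ha, by norm_num⟩
    · obtain ⟨hn', _, hv⟩ := ih (k/2).toNat (by omega) (k/2) a rfl (by omega) ha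
      exact ⟨hn', hv⟩
  have hsq_ne : poly_mul p p ≠ [] := poly_mul_ne_nil p p hph.1 hph.1
  have hsq_v : toP (poly_mul p p) = toP a ^ (2 * (k/2).toNat) := by
    rw [toP_poly_mul, hph.2, ← pow_add]
    congr 1
    omega
  by_cases hodd : PySem.Int.band k 1 ≠ 0
  · rw [if_pos hodd]
    refine ⟨poly_mul_ne_nil _ a hsq_ne ha, trimmed_poly_mul _ a, ?_⟩
    rw [toP_poly_mul, hsq_v]
    have h1 : k % 2 = 1 := (band_one_pos k (by omega)).1 hodd
    have hexp : k.toNat = 2 * (k/2).toNat + 1 := by omega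
    rw [hexp, pow_add, pow_one]
  · rw [if_neg hodd]
    refine ⟨hsq_ne, trimmed_poly_mul p p, ?_⟩
    rw [hsq_v]
    have h0 : k % 2 = 0 := by have := band_one_pos k (by omega); omega
    congr 1
    omega

-- the degenerate case a = []
theorem poly_mul_nilish (res : List Int) (h : res = [1] ∨ res = []) :
    poly_mul res [] = [] := by
  rcases h with h | h <;> subst h <;>
    simp [poly_mul, pmOuter, pmInner] <;> rw [pyTrim] <;> simp

theorem poly_mul_nil_nil : poly_mul [] [] = [] :=
  poly_mul_nilish [] (Or.inr rfl)

theorem powLoop_nil : ∀ (n : Nat) (e : Int) (res : List Int), e.toNat = n →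
    1 ≤ e → (res = [1] ∨ res = []) → powLoop res [] e = [] := by
  intro n
  induction n using Nat.strong_induction_on with
  | _ n ih =>
  intro e res hn he hr
  subst hn
  rw [powLoop, if_pos (by omega)]
  simp only [shiftRight_one]
  set res' := if PySem.Int.band e 1 ≠ 0 then poly_mul res [] else res with hres'
  have hr' : res' = [1] ∨ res' = [] := by
    rw [hres']; split
    · exact Or.inr (poly_mul_nilish res hr)
    · exact hr
  by_cases h1 : e = 1
  · subst h1
    norm_num [hres']
    rw [powLoop]
    norm_num
    exact poly_mul_nilish res hr
  · have hne : e / 2 ≠ 0 := by omega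
    rw [if_pos hne, poly_mul_nil_nil]
    exact ih (e/2).toNat (by omega) (e/2) res' rfl (by omega) hr'

theorem alt_nil : ∀ (n : Nat) (k : Int), k.toNat = n →
    2 ≤ k → poly_pow_alt [] k = [] := by
  intro n
  induction n using Nat.strong_induction_on with
  | _ n ih =>
  intro k hn hk
  subst hn
  rw [poly_pow_alt, if_neg (by omega), if_neg (by omega)]
  simp only [poly_mulB_eq]
  rw [PySem.Int.floordiv_eq_ediv_of_pos (by omega : (0:Int) < 2)]
  have hp : poly_pow_alt [] (k / 2) = [] := by
    by_cases h1 : k / 2 = 1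
    · rw [h1, poly_pow_alt]; norm_num
    · exact ih (k/2).toNat (by omega) (k/2) rfl (by omega)
  rw [hp, poly_mul_nil_nil]
  split <;> [rw [poly_mul_nil_nil]; rfl]

-- ===== VERDICT (by name: the statement is the Claim_ definition above) =====
theorem poly_pow_spec : Claim_equal_poly_pow := by
  intro a k _
  unfold Spec_poly_pow
  by_cases h0 : k ≤ 0
  · by_cases hz : k = 0
    · subst hz
      rw [poly_pow, poly_pow_alt]
      norm_num
    · rw [poly_pow, if_neg hz, if_neg (by omega), powLoop, if_neg (by omega),
        poly_pow_alt, if_pos h0]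
  · by_cases h1 : k = 1
    · subst h1
      rw [poly_pow, poly_pow_alt]
      norm_num
    · have hk : 2 ≤ k := by omega
      rw [poly_pow, if_neg (by omega), if_neg h1]
      by_cases ha : a = []
      · subst ha
        rw [powLoop_nil k.toNat k [1] rfl (by omega) (Or.inl rfl), alt_nil k.toNat k rfl hk]
      · obtain ⟨an, at_, av⟩ := powLoop_spec k.toNat k [1] a rfl (by omega) (by simp) ha
        obtain ⟨bn, bt, bv⟩ := alt_spec k.toNat k a rfl hk ha
        apply trimmed_inj _ _ an bn at_ bt
        rw [av, bv, toP_one, one_mul]
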